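-- pv_equiv track=rewrite | github.com/LiuYangyangSDU/BINDER | BINDER.py | getFivePartBounds
-- ===== SOURCE A (Python) =====
-- def getFivePartBounds(bound_with_info, min_info_support):
--     bound_list_1, bound_list_2, bound_list_3, bound_list_4, bound_list_5 = [], [], [], [], []
--     for key, value in bound_with_info.items():
--         if value == 0:
--             bound_list_1.append(key)
--         if value == 1:
--             bound_list_2.append(key)
--         if value == 2:
--             bound_list_3.append(key)
--         if 2 < value < min_info_support:
--             bound_list_4.append(key)
--         if value >= min_info_support:
--             bound_list_5.append(key)
--     return [bound_list_1, bound_list_2, bound_list_3, bound_list_4, bound_list_5]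
-- ===== SOURCE B (Python) =====
-- def getFivePartBounds(bound_with_info, min_info_support):
--     items = bound_with_info.items()
--     return [
--         [k for k, v in items if v == 0],
--         [k for k, v in items if v == 1],
--         [k for k, v in items if v == 2],
--         [k for k, v in items if 2 < v < min_info_support],
--         [k for k, v in items if v >= min_info_support],
--     ]
-- ===== Notes on version B (the rewrite author's own statement) =====
-- stated objective: idiomatic
-- what changed: A's single pass maintaining five accumulator lists is replaced by five independent list comprehensions, one filtering scan per bucket with the same predicates.
import Mathlib
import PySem

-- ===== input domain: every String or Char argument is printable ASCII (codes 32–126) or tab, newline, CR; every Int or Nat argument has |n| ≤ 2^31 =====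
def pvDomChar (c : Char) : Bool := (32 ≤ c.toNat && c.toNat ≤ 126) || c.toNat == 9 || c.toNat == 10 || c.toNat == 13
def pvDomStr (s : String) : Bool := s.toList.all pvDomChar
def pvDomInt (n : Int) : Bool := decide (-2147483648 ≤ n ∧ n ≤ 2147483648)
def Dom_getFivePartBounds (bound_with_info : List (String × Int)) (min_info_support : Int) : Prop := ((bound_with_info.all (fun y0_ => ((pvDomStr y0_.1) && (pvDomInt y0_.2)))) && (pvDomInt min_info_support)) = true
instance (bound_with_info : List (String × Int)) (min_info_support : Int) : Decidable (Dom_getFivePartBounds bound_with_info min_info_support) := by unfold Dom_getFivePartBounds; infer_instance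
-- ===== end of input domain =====

-- B replaces A's single pass with five accumulators by five independent filtering scans (same predicates), for a plainer decomposition; equal cost.
-- ===== PORT A =====
-- Port of A: one left fold over the items, threading five accumulator lists.
def getFivePartBounds (bound_with_info : List (String × Int)) (min_info_support : Int) : List (List String) :=
  let st := bound_with_info.foldl
    (fun (st : List String × List String × List String × List String × List String) kv =>
      let (l1, l2, l3, l4, l5) := st
      let key := kv.1
      let value := kv.2
      let l1 := if value == 0 then l1 ++ [key] else l1
      let l2 := if value == 1 then l2 ++ [key] else l2
      let l3 := if value == 2 then l3 ++ [key] else l3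
      let l4 := if 2 < value ∧ value < min_info_support then l4 ++ [key] else l4
      let l5 := if value ≥ min_info_support then l5 ++ [key] else l5
      (l1, l2, l3, l4, l5))
    ([], [], [], [], [])
  [st.1, st.2.1, st.2.2.1, st.2.2.2.1, st.2.2.2.2]

-- ===== PORT B =====
-- Port of B: five independent filtering scans, one per bucket.
def getFivePartBounds_alt (bound_with_info : List (String × Int)) (min_info_support : Int) : List (List String) :=
  [ (bound_with_info.filter (fun kv => kv.2 == 0)).map Prod.fst,
    (bound_with_info.filter (fun kv => kv.2 == 1)).map Prod.fst,
    (bound_with_info.filter (fun kv => kv.2 == 2)).map Prod.fst,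
    (bound_with_info.filter (fun kv => decide (2 < kv.2 ∧ kv.2 < min_info_support))).map Prod.fst,
    (bound_with_info.filter (fun kv => decide (kv.2 ≥ min_info_support))).map Prod.fst ]

-- ===== PRECONDITION & SPEC =====
def Spec_getFivePartBounds (bound_with_info : List (String × Int)) (min_info_support : Int) (out : List (List String)) : Prop := out = getFivePartBounds_alt bound_with_info min_info_support
instance (bound_with_info : List (String × Int)) (min_info_support : Int) (out : List (List String)) : Decidable (Spec_getFivePartBounds bound_with_info min_info_support out) := by unfold Spec_getFivePartBounds; infer_instance

-- ===== CLAIM (what is proved, stated in full; the proofs are below) =====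
def Claim_equal_getFivePartBounds : Prop := ∀ (bound_with_info : List (String × Int)) (min_info_support : Int), Dom_getFivePartBounds bound_with_info min_info_support → Spec_getFivePartBounds bound_with_info min_info_support (getFivePartBounds bound_with_info min_info_support)

-- ===== LEMMAS AND PROOFS =====

-- ===== VERDICT (by name: the statement is the Claim_ definition above) =====
-- Invariant: the fold starting from any accumulators appends each bucket's filtered keys.
theorem fold_inv (xs : List (String × Int)) (m : Int)
    (l1 l2 l3 l4 l5 : List String) :
    xs.foldl
      (fun (st : List String × List String × List String × List String × List String) kv =>
        let (l1, l2, l3, l4, l5) := st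
        let key := kv.1
        let value := kv.2
        let l1 := if value == 0 then l1 ++ [key] else l1
        let l2 := if value == 1 then l2 ++ [key] else l2
        let l3 := if value == 2 then l3 ++ [key] else l3
        let l4 := if 2 < value ∧ value < m then l4 ++ [key] else l4
        let l5 := if value ≥ m then l5 ++ [key] else l5
        (l1, l2, l3, l4, l5))
      (l1, l2, l3, l4, l5)
    = (l1 ++ (xs.filter (fun kv => kv.2 == 0)).map Prod.fst,
       l2 ++ (xs.filter (fun kv => kv.2 == 1)).map Prod.fst,
       l3 ++ (xs.filter (fun kv => kv.2 == 2)).map Prod.fst,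
       l4 ++ (xs.filter (fun kv => decide (2 < kv.2 ∧ kv.2 < m))).map Prod.fst,
       l5 ++ (xs.filter (fun kv => decide (kv.2 ≥ m))).map Prod.fst) := by
  induction xs generalizing l1 l2 l3 l4 l5 with
  | nil => simp
  | cons hd tl ih =>
    simp only [List.foldl_cons, List.filter_cons]
    rw [ih]
    by_cases h1 : hd.2 = 0 <;> by_cases h2 : hd.2 = 1 <;> by_cases h3 : hd.2 = 2 <;>
      by_cases h4 : 2 < hd.2 ∧ hd.2 < m <;> by_cases h5 : m ≤ hd.2 <;>
      first
        | (exfalso; omega)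
        | (simp [h1, h2, h3, h4, h5, ge_iff_le]
           try (split <;> first | omega | simp_all))

theorem getFivePartBounds_spec : Claim_equal_getFivePartBounds := by
  intro xs m _
  unfold Spec_getFivePartBounds getFivePartBounds getFivePartBounds_alt
  rw [fold_inv]
  simp
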